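-- pv_equiv track=rewrite | github.com/dennisrcao/mixed-in-key-scripts | extract.py | has_camelot_prefix
-- ===== SOURCE A (Python) =====
-- def has_camelot_prefix(filename):
--     """Check if filename starts with a valid Camelot wheel key (1A-12B) or 'All'"""
--     # Split the filename into parts based on common separators
--     parts = filename.split(' - ')[0].split('_')[0].strip()
--
--     # Check for "All" prefix first
--     if parts.startswith('All'):
--         return False  # Treat "All" prefix as no valid Camelot key
--
--     # Valid Camelot wheel numbers and keys
--     numbers = list(range(1, 13))  # 1-12
--     keys = ['A', 'B']
--
--     # Check if any part starts with a valid Camelot combination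
--     for num in numbers:
--         for key in keys:
--             prefix = f"{num}{key}"
--             if parts.startswith(prefix):
--                 return True
--     return False
-- ===== SOURCE B (Python) =====
-- def _starts_with_camelot_key(parts):
--     # maximal leading ASCII-digit run; valid iff its value is 1..12 with no
--     # leading zero and the next character is 'A' or 'B'
--     i = 0
--     while i < len(parts) and '0' <= parts[i] <= '9':
--         i += 1
--     if i == 0 or parts[0] == '0':
--         return False
--     if int(parts[:i]) > 12:
--         return False
--     return i < len(parts) and parts[i] in ('A', 'B')
--
-- def has_camelot_prefix(filename):
--     # Same preamble as the original, then a single structural parse instead of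
--     # enumerating the 24 possible "1A".."12B" prefixes.
--     parts = filename.split(' - ')[0].split('_')[0].strip()
--     return _starts_with_camelot_key(parts)
-- ===== Notes on version B (the rewrite author's own statement) =====
-- stated objective: simpler
-- what changed: A enumerates all 24 candidate prefixes '1A'..'12B' and tests startswith for each; B parses the string once, taking the maximal leading digit run and checking value 1..12 (no leading zero) followed by 'A' or 'B'.
import Mathlib
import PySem

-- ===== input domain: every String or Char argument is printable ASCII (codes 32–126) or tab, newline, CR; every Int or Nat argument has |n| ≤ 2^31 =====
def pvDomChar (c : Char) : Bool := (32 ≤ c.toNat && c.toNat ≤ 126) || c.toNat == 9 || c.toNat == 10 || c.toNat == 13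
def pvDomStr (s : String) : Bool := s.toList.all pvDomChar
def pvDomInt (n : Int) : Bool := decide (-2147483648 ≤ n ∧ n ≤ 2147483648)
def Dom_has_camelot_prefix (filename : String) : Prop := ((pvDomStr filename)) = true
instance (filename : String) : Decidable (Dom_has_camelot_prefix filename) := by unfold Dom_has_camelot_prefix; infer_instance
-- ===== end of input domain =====

-- B replaces A's 12x2 prefix-enumeration loop by one structural parse of the
-- leading digit run (objective: simpler); return-value equivalence only.

-- ===== PORT A =====
-- f"{num}{key}" as toStr num ++ key; split(sep)[0] : split? is some (sep nonempty)
-- and the list is nonempty, so [0] never raises.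
def has_camelot_prefix (filename : String) : Bool :=
  let parts := PySem.Str.strip
    (((PySem.Str.split? (((PySem.Str.split? filename " - ").getD []).headD "") "_").getD []).headD "")
  if PySem.Str.startswith parts "All" then false
  else
    let numbers := PySem.List.pyRange 1 13 1
    let keys := ["A", "B"]
    numbers.any (fun num => keys.any (fun key =>
      PySem.Str.startswith parts (PySem.Int.toStr num ++ key)))

-- ===== PORT B =====
-- port of B's helper _starts_with_camelot_key on the code points of parts:
-- the while loop computing i is the takeWhile/dropWhile split of parts at the first
-- non-digit; int(parts[:i]) on an ASCII digit run is its positional value (exact here).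
def altCore (cs : List Char) : Bool :=
  let run := cs.takeWhile (fun c => decide ('0' ≤ c) && decide (c ≤ '9'))
  match run with
  | [] => false                                   -- i == 0
  | d :: _ =>
    if d == '0' then false                        -- parts[0] == '0'
    else if 12 < run.foldl (fun a c => 10 * a + (c.toNat - 48)) 0 then false  -- int(parts[:i]) > 12
    else
      match cs.dropWhile (fun c => decide ('0' ≤ c) && decide (c ≤ '9')) with -- parts[i:]
      | [] => false                               -- i == len(parts)
      | k :: _ => k == 'A' || k == 'B'

def has_camelot_prefix_alt (filename : String) : Bool :=
  let parts := PySem.Str.strip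
    (((PySem.Str.split? (((PySem.Str.split? filename " - ").getD []).headD "") "_").getD []).headD "")
  altCore parts.toList

-- ===== PRECONDITION & SPEC =====
def Spec_has_camelot_prefix (filename : String) (out : Bool) : Prop := out = has_camelot_prefix_alt filename
instance (filename : String) (out : Bool) : Decidable (Spec_has_camelot_prefix filename out) := by unfold Spec_has_camelot_prefix; infer_instance

-- ===== CLAIM (what is proved, stated in full; the proofs are below) =====
def Claim_equal_has_camelot_prefix : Prop := ∀ (filename : String), Dom_has_camelot_prefix filename → Spec_has_camelot_prefix filename (has_camelot_prefix filename)

-- ===== LEMMAS AND PROOFS =====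

def dg (c : Char) : Bool := decide ('0' ≤ c) && decide (c ≤ '9')

def dj (cs p : List Char) : Bool := p.isPrefixOf cs

lemma dg_iff (c : Char) : dg c = true ↔ (48 ≤ c.toNat ∧ c.toNat ≤ 57) := by
  simp [dg, Char.le_def, UInt32.le_iff_toNat_le]

lemma dg_iff_not (c : Char) : dg c = false ↔ ¬(48 ≤ c.toNat ∧ c.toNat ≤ 57) := by
  rw [← dg_iff]; cases dg c <;> simp

-- code points of the character literals the ports mention
lemma litv : ('0':Char).toNat = 48 ∧ ('1':Char).toNat = 49 ∧ ('2':Char).toNat = 50 ∧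
    ('9':Char).toNat = 57 ∧ ('A':Char).toNat = 65 ∧ ('B':Char).toNat = 66 ∧
    ('l':Char).toNat = 108 := by decide

lemma char_eq_iff (a b : Char) : a = b ↔ a.toNat = b.toNat := by
  constructor
  · rintro rfl; rfl
  · intro h; exact Char.ext (UInt32.toNat_inj.mp h)

lemma foldl_ge (l : List Char) (acc : Nat) :
    acc ≤ l.foldl (fun a c => 10 * a + (c.toNat - 48)) acc := by
  induction l generalizing acc with
  | nil => exact Nat.le_refl _
  | cons c l ih => exact Nat.le_trans (by omega) (ih (10 * acc + (c.toNat - 48)))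

lemma not_all_of_digit (a : Char) (t : List Char) (h : dg a = true) :
    dj (a :: t) ['A','l','l'] = false := by
  cases hsw : dj (a :: t) ['A','l','l'] with
  | false => rfl
  | true =>
    exfalso
    simp [dj, List.isPrefixOf, char_eq_iff, litv.2.2.2.2.1] at hsw
    have := (dg_iff a).mp h
    omega

-- the 24 prefix tests on a string of length ≥ 3, characterised arithmetically
lemma disj_char (a b c : Char) (rest : List Char) :
    (dj (a::b::c::rest) ['1','A'] || (dj (a::b::c::rest) ['1','B'] || (dj (a::b::c::rest) ['2','A'] || (dj (a::b::c::rest) ['2','B'] || (dj (a::b::c::rest) ['3','A'] || (dj (a::b::c::rest) ['3','B'] || (dj (a::b::c::rest) ['4','A'] || (dj (a::b::c::rest) ['4','B'] || (dj (a::b::c::rest) ['5','A'] || (dj (a::b::c::rest) ['5','B'] || (dj (a::b::c::rest) ['6','A'] || (dj (a::b::c::rest) ['6','B'] || (dj (a::b::c::rest) ['7','A'] || (dj (a::b::c::rest) ['7','B'] || (dj (a::b::c::rest) ['8','A'] || (dj (a::b::c::rest) ['8','B'] || (dj (a::b::c::rest) ['9','A'] || (dj (a::b::c::rest) ['9','B']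 || (dj (a::b::c::rest) ['1','0','A'] || (dj (a::b::c::rest) ['1','0','B'] || (dj (a::b::c::rest) ['1','1','A'] || (dj (a::b::c::rest) ['1','1','B'] || (dj (a::b::c::rest) ['1','2','A'] || (dj (a::b::c::rest) ['1','2','B'])))))))))))))))))))))))) = true ↔
      ((49 ≤ a.toNat ∧ a.toNat ≤ 57) ∧ (b.toNat = 65 ∨ b.toNat = 66)) ∨
      (a.toNat = 49 ∧ (48 ≤ b.toNat ∧ b.toNat ≤ 50) ∧ (c.toNat = 65 ∨ c.toNat = 66)) := by
  constructor
  · intro h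
    simp [dj, List.isPrefixOf, char_eq_iff, litv.1, litv.2.1, litv.2.2.1, litv.2.2.2.1, litv.2.2.2.2.1, litv.2.2.2.2.2.1, litv.2.2.2.2.2.2] at h
    rcases h with h|h|h|h|h|h|h|h|h|h|h|h|h|h|h|h|h|h|h|h|h|h|h|h <;> omega
  · intro h
    simp [dj, List.isPrefixOf, char_eq_iff, litv.1, litv.2.1, litv.2.2.1, litv.2.2.2.1, litv.2.2.2.2.1, litv.2.2.2.2.2.1, litv.2.2.2.2.2.2]
    rcases h with ⟨⟨h1, h2⟩, hb | hb⟩ | ⟨h1, ⟨h2, h3⟩, hc | hc⟩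
    · have h9 : a.toNat = 49 ∨ a.toNat = 50 ∨ a.toNat = 51 ∨ a.toNat = 52 ∨ a.toNat = 53 ∨
          a.toNat = 54 ∨ a.toNat = 55 ∨ a.toNat = 56 ∨ a.toNat = 57 := by omega
      rcases h9 with h|h|h|h|h|h|h|h|h <;> simp [*]
    · have h9 : a.toNat = 49 ∨ a.toNat = 50 ∨ a.toNat = 51 ∨ a.toNat = 52 ∨ a.toNat = 53 ∨
          a.toNat = 54 ∨ a.toNat = 55 ∨ a.toNat = 56 ∨ a.toNat = 57 := by omega
      rcases h9 with h|h|h|h|h|h|h|h|h <;> simp [*]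
    · have h3' : b.toNat = 48 ∨ b.toNat = 49 ∨ b.toNat = 50 := by omega
      rcases h3' with h|h|h <;> simp [*]
    · have h3' : b.toNat = 48 ∨ b.toNat = 49 ∨ b.toNat = 50 := by omega
      rcases h3' with h|h|h <;> simp [*]

-- the same tests on a string of length exactly 2
lemma disj_char2 (a b : Char) :
    (dj ([a, b]) ['1','A'] || (dj ([a, b]) ['1','B'] || (dj ([a, b]) ['2','A'] || (dj ([a, b]) ['2','B'] || (dj ([a, b]) ['3','A'] || (dj ([a, b]) ['3','B'] || (dj ([a, b]) ['4','A'] || (dj ([a, b]) ['4','B'] || (dj ([a, b]) ['5','A'] || (dj ([a, b]) ['5','B'] || (dj ([a, b]) ['6','A'] || (dj ([a, b]) ['6','B'] || (dj ([a, b]) ['7','A'] || (dj ([a, b]) ['7','B'] || (dj ([a, b]) ['8','A'] || (dj ([a, b]) ['8','B'] || (dj ([a, b]) ['9','A'] || (dj ([a, b]) ['9','B'] || (dj ([a, b]) ['1','0','A'] || (dj ([a, b]) ['1','0','B'] || (dj ([a, b]) ['1','1','A'] || (dj ([a, b]) ['1','1','B'] || (dj ([a, b]) ['1','2','A'] ||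 (dj ([a, b]) ['1','2','B'])))))))))))))))))))))))) = true ↔
      ((49 ≤ a.toNat ∧ a.toNat ≤ 57) ∧ (b.toNat = 65 ∨ b.toNat = 66)) := by
  constructor
  · intro h
    simp [dj, List.isPrefixOf, char_eq_iff, litv.1, litv.2.1, litv.2.2.1, litv.2.2.2.1, litv.2.2.2.2.1, litv.2.2.2.2.2.1, litv.2.2.2.2.2.2] at h
    rcases h with h|h|h|h|h|h|h|h|h|h|h|h|h|h|h|h|h|h <;> omega
  · intro h
    simp [dj, List.isPrefixOf, char_eq_iff, litv.1, litv.2.1, litv.2.2.1, litv.2.2.2.1, litv.2.2.2.2.1, litv.2.2.2.2.2.1, litv.2.2.2.2.2.2]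
    rcases h with ⟨⟨h1, h2⟩, hb | hb⟩ <;>
    · have h9 : a.toNat = 49 ∨ a.toNat = 50 ∨ a.toNat = 51 ∨ a.toNat = 52 ∨ a.toNat = 53 ∨
          a.toNat = 54 ∨ a.toNat = 55 ∨ a.toNat = 56 ∨ a.toNat = 57 := by omega
      rcases h9 with h|h|h|h|h|h|h|h|h <;> simp [*]

set_option maxHeartbeats 1000000 in
-- the core fact: on any character list, A's 24 startswith tests agree with B's parse
lemma core (cs : List Char) :
    (if dj cs ['A','l','l'] then false else (dj (cs) ['1','A'] || (dj (cs) ['1','B'] || (dj (cs) ['2','A'] || (dj (cs) ['2','B'] || (dj (cs) ['3','A'] || (dj (cs) ['3','B'] || (dj (cs) ['4','A'] || (dj (cs) ['4','B'] || (dj (cs) ['5','A'] || (dj (cs) ['5','B'] || (dj (cs) ['6','A'] || (dj (cs) ['6','B'] || (dj (cs) ['7','A'] || (dj (cs) ['7','B'] || (dj (cs) ['8','A'] || (dj (cs) ['8','B'] || (dj (cs) ['9','A'] || (dj (cs) ['9','B'] || (dj (cs) ['1','0','A'] || (dj (cs) ['1','0','B'] || (dj (cs) ['1','1','A'] || (dj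 (cs) ['1','1','B'] || (dj (cs) ['1','2','A'] || (dj (cs) ['1','2','B'])))))))))))))))))))))))))
    = altCore cs := by
  simp only [altCore, show (fun c => decide ('0' ≤ c) && decide (c ≤ '9')) = dg from rfl]
  rcases cs with _ | ⟨a, cs⟩
  · decide
  rcases cs with _ | ⟨b, cs⟩
  · cases hda : dg a <;>
      simp [dj, List.isPrefixOf, hda]
  rcases cs with _ | ⟨c, rest⟩
  · -- two characters
    rw [Bool.eq_iff_iff]
    have hsw : dj [a, b] ['A','l','l'] = false := by
      simp [dj, List.isPrefixOf]
    simp only [hsw, Bool.false_eq_true, if_false]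
    rw [disj_char2]
    cases hda : dg a
    · have ha := (dg_iff_not a).mp hda
      simp [hda]
      omega
    · have ha := (dg_iff a).mp hda
      cases hdb : dg b
      · have hb := (dg_iff_not b).mp hdb
        simp [hda, hdb, char_eq_iff, litv.1, litv.2.1, litv.2.2.1, litv.2.2.2.1, litv.2.2.2.2.1, litv.2.2.2.2.2.1, litv.2.2.2.2.2.2]
        omega
      · have hb := (dg_iff b).mp hdb
        simp [hda, hdb, char_eq_iff, litv.1, litv.2.1, litv.2.2.1, litv.2.2.2.1, litv.2.2.2.2.1, litv.2.2.2.2.2.1, litv.2.2.2.2.2.2]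
        omega
  · -- three or more characters
    rw [Bool.eq_iff_iff]
    cases hda : dg a
    · have ha := (dg_iff_not a).mp hda
      cases hsw : dj (a::b::c::rest) ['A','l','l']
      · simp only [hsw, Bool.false_eq_true, if_false]
        rw [disj_char]
        simp [hda]
        omega
      · simp [hsw, hda]
    · have ha := (dg_iff a).mp hda
      simp only [not_all_of_digit a (b::c::rest) hda, Bool.false_eq_true, if_false]
      rw [disj_char]
      cases hdb : dg b
      · have hb := (dg_iff_not b).mp hdb
        simp [hda, hdb, char_eq_iff, litv.1, litv.2.1, litv.2.2.1, litv.2.2.2.1, litv.2.2.2.2.1, litv.2.2.2.2.2.1, litv.2.2.2.2.2.2]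
        omega
      · have hb := (dg_iff b).mp hdb
        cases hdc : dg c
        · have hc := (dg_iff_not c).mp hdc
          simp [hda, hdb, hdc, char_eq_iff, litv.1, litv.2.1, litv.2.2.1, litv.2.2.2.1, litv.2.2.2.2.1, litv.2.2.2.2.2.1, litv.2.2.2.2.2.2]
          omega
        · -- a, b, c all digits: the run has length ≥ 3, so its value exceeds 12
          -- unless a = '0'; either way both sides are false
          have hc := (dg_iff c).mp hdc
          by_cases h0 : a.toNat = 48
          · have h0' : (a == '0') = true := by
              rw [beq_iff_eq, char_eq_iff, litv.1]; exact h0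
            simp [hda, hdb, hdc, h0', char_eq_iff, litv.1, litv.2.1, litv.2.2.1, litv.2.2.2.1, litv.2.2.2.2.1, litv.2.2.2.2.2.1, litv.2.2.2.2.2.2]
            omega
          · have hval : 12 < (rest.takeWhile dg).foldl
                (fun a c => 10 * a + (c.toNat - 48))
                (10 * (10 * (a.toNat - 48) + (b.toNat - 48)) + (c.toNat - 48)) := by
              have := foldl_ge (rest.takeWhile dg)
                (10 * (10 * (a.toNat - 48) + (b.toNat - 48)) + (c.toNat - 48))
              omega
            simp [hda, hdb, hdc, hval, h0, char_eq_iff, litv.1, litv.2.1, litv.2.2.1, litv.2.2.2.1, litv.2.2.2.2.1, litv.2.2.2.2.2.1, litv.2.2.2.2.2.2]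
            omega

-- ===== VERDICT (by name: the statement is the Claim_ definition above) =====
set_option maxHeartbeats 4000000 in
theorem has_camelot_prefix_spec : Claim_equal_has_camelot_prefix := by
  intro filename _
  unfold Spec_has_camelot_prefix has_camelot_prefix has_camelot_prefix_alt
  rw [show PySem.List.pyRange 1 13 1 = [1,2,3,4,5,6,7,8,9,10,11,12] from by decide]
  simp only [List.any_cons, List.any_nil, Bool.or_false, Bool.or_assoc, PySem.Str.startswith_eq,
    show ∀ cs p, PySem.Chars.startswith cs p = dj cs p from fun _ _ => rfl,
    show ("All" : String).toList = ['A','l','l'] from rfl,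
    show (PySem.Int.toStr 1 ++ "A").toList = ['1','A'] from rfl,
    show (PySem.Int.toStr 1 ++ "B").toList = ['1','B'] from rfl,
    show (PySem.Int.toStr 2 ++ "A").toList = ['2','A'] from rfl,
    show (PySem.Int.toStr 2 ++ "B").toList = ['2','B'] from rfl,
    show (PySem.Int.toStr 3 ++ "A").toList = ['3','A'] from rfl,
    show (PySem.Int.toStr 3 ++ "B").toList = ['3','B'] from rfl,
    show (PySem.Int.toStr 4 ++ "A").toList = ['4','A'] from rfl,
    show (PySem.Int.toStr 4 ++ "B").toList = ['4','B'] from rfl,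
    show (PySem.Int.toStr 5 ++ "A").toList = ['5','A'] from rfl,
    show (PySem.Int.toStr 5 ++ "B").toList = ['5','B'] from rfl,
    show (PySem.Int.toStr 6 ++ "A").toList = ['6','A'] from rfl,
    show (PySem.Int.toStr 6 ++ "B").toList = ['6','B'] from rfl,
    show (PySem.Int.toStr 7 ++ "A").toList = ['7','A'] from rfl,
    show (PySem.Int.toStr 7 ++ "B").toList = ['7','B'] from rfl,
    show (PySem.Int.toStr 8 ++ "A").toList = ['8','A'] from rfl,
    show (PySem.Int.toStr 8 ++ "B").toList = ['8','B'] from rfl,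
    show (PySem.Int.toStr 9 ++ "A").toList = ['9','A'] from rfl,
    show (PySem.Int.toStr 9 ++ "B").toList = ['9','B'] from rfl,
    show (PySem.Int.toStr 10 ++ "A").toList = ['1','0','A'] from rfl,
    show (PySem.Int.toStr 10 ++ "B").toList = ['1','0','B'] from rfl,
    show (PySem.Int.toStr 11 ++ "A").toList = ['1','1','A'] from rfl,
    show (PySem.Int.toStr 11 ++ "B").toList = ['1','1','B'] from rfl,
    show (PySem.Int.toStr 12 ++ "A").toList = ['1','2','A'] from rfl,
    show (PySem.Int.toStr 12 ++ "B").toList = ['1','2','B'] from rfl]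
  exact core _
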